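-- pv_equiv track=rewrite | github.com/wooseok-AI/CodingTestStudy | Programmers/42860_조이스틱.py | alphabet_distance
-- ===== SOURCE A (Python) =====
-- def alphabet_distance(alpha):
--     alphabet = "ABCDEFGHIJKLMNOPQRSTUVWXYZ"
--     # A인 경우 변경안해도 되므로 0
--     if alpha == "A":
--         return 0
--     else:
--         left_count = 0
--         for i in range(1, len(alphabet)):
--             if alphabet[i] == alpha:
--                 left_count = i
--                 break
--         # 반대쪽의 거리는 (전체 알파벳 개수) - (왼쪽 이동거리)
--         right_count = len(alphabet) - left_count
--
--         return min(left_count, right_count)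
-- ===== SOURCE B (Python) =====
-- def alphabet_distance(alpha):
--     # closed-form: index arithmetic instead of a linear scan over the alphabet
--     if len(alpha) == 1 and 'A' <= alpha <= 'Z':
--         i = ord(alpha) - ord('A')
--         return min(i, 26 - i)
--     return 0
-- ===== Notes on version B (the rewrite author's own statement) =====
-- stated objective: idiomatic
-- what changed: Replaces the linear scan over the alphabet string (with break) by a direct ord()-based index computation min(i, 26-i), with the same return-0 behaviour for any input that is not a single uppercase letter.
import Mathlib
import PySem

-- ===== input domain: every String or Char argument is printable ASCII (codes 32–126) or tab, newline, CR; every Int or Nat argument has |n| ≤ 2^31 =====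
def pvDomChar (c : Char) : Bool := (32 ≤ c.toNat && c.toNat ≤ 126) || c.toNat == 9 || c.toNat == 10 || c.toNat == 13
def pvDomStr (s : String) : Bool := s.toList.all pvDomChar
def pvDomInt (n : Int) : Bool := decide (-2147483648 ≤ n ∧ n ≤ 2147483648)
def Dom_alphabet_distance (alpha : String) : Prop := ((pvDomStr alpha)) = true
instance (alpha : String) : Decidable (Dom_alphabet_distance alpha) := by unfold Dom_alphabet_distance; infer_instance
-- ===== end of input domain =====

-- B replaces A's linear scan over the alphabet string by a closed-form ord()-based index computation (idiomatic).


-- ===== PORT A =====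
-- the loop 'for i in range(1, len(alphabet)): if alphabet[i] == alpha: left_count = i; break'
-- (on a match it returns i, i.e. the break; exhausting the range leaves left_count = 0)
def adLoop (a : List Char) : List Int → Int
  | [] => 0
  | i :: rest =>
      match PySem.List.pyGet? "ABCDEFGHIJKLMNOPQRSTUVWXYZ".toList i with
      | some c => if a = [c] then i else adLoop a rest
      | none => adLoop a rest  -- unreachable: every i of the range is in bounds

def alphabet_distance (alpha : String) : Int :=
  let alphabet := "ABCDEFGHIJKLMNOPQRSTUVWXYZ"
  if alpha = "A" then 0
  else
    let left_count := adLoop alpha.toList (PySem.List.pyRange 1 (PySem.Str.len alphabet) 1)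
    let right_count := (PySem.Str.len alphabet : Int) - left_count
    min left_count right_count

-- ===== PORT B =====
def alphabet_distance_alt (alpha : String) : Int :=
  -- len(alpha) == 1 and 'A' <= alpha <= 'Z'
  match alpha.toList with
  | [c] =>
      if 'A' ≤ c ∧ c ≤ 'Z' then
        let i : Int := (c.toNat : Int) - 65
        min i (26 - i)
      else 0
  | _ => 0

-- ===== PRECONDITION & SPEC =====
def Spec_alphabet_distance (alpha : String) (out : Int) : Prop := out = alphabet_distance_alt alpha
instance (alpha : String) (out : Int) : Decidable (Spec_alphabet_distance alpha out) := by unfold Spec_alphabet_distance; infer_instance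

-- ===== CLAIM (what is proved, stated in full; the proofs are below) =====
def Claim_equal_alphabet_distance : Prop := ∀ (alpha : String), Dom_alphabet_distance alpha → Spec_alphabet_distance alpha (alphabet_distance alpha)

-- ===== LEMMAS AND PROOFS =====

theorem pyGetL (j : Nat) (h : j ≤ 25) :
    PySem.List.pyGet? "ABCDEFGHIJKLMNOPQRSTUVWXYZ".toList (j : Int) = some (Char.ofNat (65 + j)) := by
  interval_cases j <;> decide

theorem toNat_ofNat_alpha (j : Nat) (h : j ≤ 25) : (Char.ofNat (65 + j)).toNat = 65 + j := by
  interval_cases j <;> decide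

theorem char_toNat_inj {c d : Char} (h : c.toNat = d.toNat) : c = d := by
  apply Char.ext
  exact UInt32.toNat_inj.mp h

theorem adLoop_nonsingle (a : List Char) (ha : ∀ c : Char, a ≠ [c]) :
    ∀ l : List Int, adLoop a l = 0 := by
  intro l
  induction l with
  | nil => rfl
  | cons i rest ih =>
      unfold adLoop
      cases PySem.List.pyGet? "ABCDEFGHIJKLMNOPQRSTUVWXYZ".toList i with
      | none => exact ih
      | some c => simpa [ha c] using ih

theorem adLoop_single (c : Char) :
    ∀ (n : Nat), n ≤ 25 → ∀ (j : Nat), j = 26 - n → 1 ≤ j →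
      adLoop [c] (PySem.List.pyRange (j : Int) 26 1) =
        if 65 + j ≤ c.toNat ∧ c.toNat ≤ 90 then ((c.toNat : Int) - 65) else 0 := by
  intro n
  induction n with
  | zero =>
      intro _ j hj _
      subst hj
      rw [PySem.List.pyRange_one_eq_nil (by norm_num)]
      have : ¬ (65 + 26 ≤ c.toNat ∧ c.toNat ≤ 90) := by omega
      simp [adLoop, this]
  | succ n ih =>
      intro hn j hj hj1
      have hjlt : j ≤ 25 := by omega
      rw [PySem.List.pyRange_one_cons (by exact_mod_cast (by omega : (j : Int) < 26))]
      unfold adLoop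
      rw [pyGetL j hjlt]
      dsimp only
      by_cases hc : c = Char.ofNat (65 + j)
      · have hcn : c.toNat = 65 + j := by rw [hc]; exact toNat_ofNat_alpha j hjlt
        have hcond : 65 + j ≤ c.toNat ∧ c.toNat ≤ 90 := by omega
        rw [if_pos (by rw [hc] : ([c] : List Char) = [Char.ofNat (65 + j)]), if_pos hcond]
        omega
      · have hne : ([c] : List Char) ≠ [Char.ofNat (65 + j)] := by
          simpa using hc
        have hcast : ((j : Int) + 1) = ((j + 1 : Nat) : Int) := by push_cast; ring
        rw [if_neg hne, hcast, ih (by omega) (j + 1) (by omega) (by omega)]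
        have hcn : c.toNat ≠ 65 + j := fun h => hc (char_toNat_inj (by rw [h, toNat_ofNat_alpha j hjlt]))
        split_ifs <;> omega

theorem ofList_eq_A_iff (c : Char) : String.ofList [c] = "A" ↔ c = 'A' := by
  constructor
  · intro h
    have := congrArg String.toList h
    simpa using this
  · intro h; rw [h]

theorem char_le_iff_toNat (c d : Char) : c ≤ d ↔ c.toNat ≤ d.toNat := by
  rw [Char.le_def, UInt32.le_iff_toNat_le]; rfl

theorem alphabet_distance_eq_alt (alpha : String) :
    alphabet_distance alpha = alphabet_distance_alt alpha := by
  have halpha : alpha = String.ofList alpha.toList := by simp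
  rw [halpha]
  rcases hl : alpha.toList with _ | ⟨c, _ | ⟨d, rest⟩⟩
  · decide
  · -- single character
    unfold alphabet_distance alphabet_distance_alt
    dsimp only
    simp only [String.toList_ofList]
    rw [show PySem.Str.len "ABCDEFGHIJKLMNOPQRSTUVWXYZ" = (26 : Int) from by decide]
    have hloop := adLoop_single c 25 (by omega) 1 (by omega) (by omega)
    norm_num at hloop
    rw [hloop]
    simp only [ofList_eq_A_iff]
    have hA : (c = 'A') ↔ c.toNat = 65 := by
      constructor
      · intro h; rw [h]; rfl
      · intro h; exact char_toNat_inj (by rw [h]; rfl)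
    simp only [char_le_iff_toNat, show ('A').toNat = 65 from rfl, show ('Z').toNat = 90 from rfl]
    split_ifs with h1 h2 h3 h4 h5 <;> simp_all <;> omega
  · -- length ≥ 2
    unfold alphabet_distance alphabet_distance_alt
    dsimp only
    simp only [String.toList_ofList]
    rw [adLoop_nonsingle (c :: d :: rest) (by intro x; simp)]
    have : String.ofList (c :: d :: rest) ≠ "A" := by
      intro h
      have := congrArg String.toList h
      simp at this
    simp [this]

theorem alphabet_distance_spec : Claim_equal_alphabet_distance := by
  intro alpha _
  unfold Spec_alphabet_distance
  exact alphabet_distance_eq_alt alpha
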